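-- pv_equiv track=rewrite | github.com/Hammond865/Branch-Prediction-Simulator | branch_prediction.py | two_bit_prediction
-- ===== SOURCE A (Python) =====
-- def two_bit_prediction(lines, size):
--     incorrect = 0
--     table = []
--     # Default value of zero at each index
--     for i in range(0, size):
--         table.append(0)
--
--     for current in lines:
--         # Split line along spaces; address then result
--         substrings = current.split()
--         index = int(substrings[0], 16) % size
--         actual = int(substrings[1])
--         # Check if prediction matches result, update values as needed
--         match table[index]:
--             # Predict not taken
--             case 0:
--                 if actual == 1:
--                     incorrect += 1
--                     table[index] += 1
--             case 1:
--                 if actual == 1: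
--                     incorrect += 1
--                     table[index] += 1
--                 else:
--                     table[index] -= 1
--             # Predict taken
--             case 2:
--                 if actual == 1:
--                     table[index] += 1
--                 else:
--                     incorrect += 1
--                     table[index] -= 1
--             case 3:
--                 if actual == 1:
--                     # Do nothing
--                     trash = 0
--                 else:
--                     incorrect += 1
--                     table[index] -= 1
--
--     return incorrect
-- ===== SOURCE B (Python) =====
-- def two_bit_prediction(lines, size):
--     # Two staged passes instead of A's single interleaved pass over a shared table:
--     # per-index counters are independent, so first bucket each line's outcome by its
--     # table index, then replay every index's own outcome sequence separately.
--     buckets = {}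
--     for line in lines:
--         address, result = line.split()[:2]
--         buckets.setdefault(int(address, 16) % size, []).append(int(result) == 1)
--     total = 0
--     for j in range(size):
--         counter = 0
--         for taken in buckets.get(j, []):
--             if (counter >= 2) != taken:
--                 total += 1
--             counter = min(3, counter + 1) if taken else max(0, counter - 1)
--     return total
-- ===== Notes on version B (the rewrite author's own statement) =====
-- stated objective: alternative
-- what changed: Instead of one interleaved pass updating a shared table with a four-case match, B first groups each line's outcome by its table index and then simulates every index's saturating counter independently over its own outcome sequence, summing the mispredictions (correct because the per-index counters never interact).
import Mathlib
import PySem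

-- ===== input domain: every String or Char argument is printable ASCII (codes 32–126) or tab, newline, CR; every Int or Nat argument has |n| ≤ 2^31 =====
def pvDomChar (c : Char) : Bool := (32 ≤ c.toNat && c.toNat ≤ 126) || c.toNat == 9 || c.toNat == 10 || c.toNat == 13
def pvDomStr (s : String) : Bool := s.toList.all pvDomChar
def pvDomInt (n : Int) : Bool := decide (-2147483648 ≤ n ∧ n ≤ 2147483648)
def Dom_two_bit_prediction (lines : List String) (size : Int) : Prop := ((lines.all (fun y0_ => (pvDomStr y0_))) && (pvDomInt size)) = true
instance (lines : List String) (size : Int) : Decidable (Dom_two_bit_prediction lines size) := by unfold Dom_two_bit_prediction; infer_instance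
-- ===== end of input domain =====

-- B replaces A's single interleaved pass over a shared table (four-case match) by a
-- two-stage algorithm: bucket each line's outcome by table index, then simulate every
-- index's saturating counter independently; same return value on Pre_.

-- ===== PORT A =====
-- one iteration of A's loop body: state = (incorrect, table)
def pvStepA (size : Int) (st : Int × List Int) (current : String) : Int × List Int :=
  let substrings := PySem.Str.split₀ current
  let index := PySem.Int.mod ((PySem.Int.ofStrBase? (PySem.List.pyGetD substrings 0 "") 16).getD 0) size
  let actual := (PySem.Int.ofStr? (PySem.List.pyGetD substrings 1 "")).getD 0
  let c := PySem.List.pyGetD st.2 index 0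
  if c = 0 then
    (if actual = 1 then (st.1 + 1, PySem.List.pySetD st.2 index (c + 1)) else st)
  else if c = 1 then
    (if actual = 1 then (st.1 + 1, PySem.List.pySetD st.2 index (c + 1))
     else (st.1, PySem.List.pySetD st.2 index (c - 1)))
  else if c = 2 then
    (if actual = 1 then (st.1, PySem.List.pySetD st.2 index (c + 1))
     else (st.1 + 1, PySem.List.pySetD st.2 index (c - 1)))
  else if c = 3 then
    (if actual = 1 then st else (st.1 + 1, PySem.List.pySetD st.2 index (c - 1)))
  else st  -- Python's match falls through silently on any other value

def two_bit_prediction (lines : List String) (size : Int) : Int :=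
  let table := (PySem.List.pyRange 0 size 1).foldl (fun t _ => t ++ [(0 : Int)]) []
  (lines.foldl (pvStepA size) (0, table)).1

-- ===== PORT B =====
-- stage 1 loop body: bucket this line's outcome (taken?) under its table index
def pvBucketB (size : Int) (d : PySem.Dict Int (List Bool)) (line : String) : PySem.Dict Int (List Bool) :=
  let ts := PySem.List.slice (PySem.Str.split₀ line) none (some 2)
  let index := PySem.Int.mod ((PySem.Int.ofStrBase? (PySem.List.pyGetD ts 0 "") 16).getD 0) size
  let taken := decide ((PySem.Int.ofStr? (PySem.List.pyGetD ts 1 "")).getD 0 = 1)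
  d.insert index (d.getD index [] ++ [taken])

def two_bit_prediction_alt (lines : List String) (size : Int) : Int :=
  let buckets := lines.foldl (pvBucketB size) PySem.Dict.empty
  (PySem.List.pyRange 0 size 1).foldl
    (fun total j =>
      ((buckets.getD j []).foldl
        (fun st taken =>
          (if decide (2 ≤ st.2) ≠ taken then st.1 + 1 else st.1,
           if taken then min 3 (st.2 + 1) else max 0 (st.2 - 1)))
        (total, (0 : Int))).1)
    0

-- ===== PRECONDITION & SPEC =====
-- Pre_ excludes exactly the inputs where A raises: with a nonempty trace, size must be
-- positive (size = 0 is a ZeroDivisionError, size < 0 an IndexError on the empty table)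
-- and every line must carry at least two tokens, a base-16 int then a base-10 int
-- (otherwise IndexError / ValueError).
def Pre_two_bit_prediction (lines : List String) (size : Int) : Prop :=
  lines = [] ∨
    (0 < size ∧ ∀ line ∈ lines,
      2 ≤ (PySem.Str.split₀ line).length ∧
      (PySem.Int.ofStrBase? ((PySem.Str.split₀ line).getD 0 "") 16).isSome = true ∧
      (PySem.Int.ofStr? ((PySem.Str.split₀ line).getD 1 "")).isSome = true)
instance (lines : List String) (size : Int) : Decidable (Pre_two_bit_prediction lines size) := by
  unfold Pre_two_bit_prediction; infer_instance

def pvWitness_two_bit_prediction : List String × Int := (["1a 1", "2 0", "1A 1 x"], 4)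

def Spec_two_bit_prediction (lines : List String) (size : Int) (out : Int) : Prop := out = two_bit_prediction_alt lines size
instance (lines : List String) (size : Int) (out : Int) : Decidable (Spec_two_bit_prediction lines size out) := by unfold Spec_two_bit_prediction; infer_instance

-- ===== CLAIM (what is proved, stated in full; the proofs are below) =====
def Claim_equal_two_bit_prediction : Prop := ∀ (lines : List String) (size : Int), Dom_two_bit_prediction lines size → Pre_two_bit_prediction lines size → Spec_two_bit_prediction lines size (two_bit_prediction lines size)

-- ===== LEMMAS AND PROOFS =====

-- the table index and the outcome a line contributes
def pvIdx (size : Int) (line : String) : Int :=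
  PySem.Int.mod ((PySem.Int.ofStrBase? (PySem.List.pyGetD (PySem.Str.split₀ line) 0 "") 16).getD 0) size
def pvTaken (line : String) : Bool :=
  decide ((PySem.Int.ofStr? (PySem.List.pyGetD (PySem.Str.split₀ line) 1 "")).getD 0 = 1)

-- one step of the saturating 2-bit counter: misprediction cost and next state
def pvMis (c : Int) (b : Bool) : Int := if decide (2 ≤ c) ≠ b then 1 else 0
def pvNxt (c : Int) (b : Bool) : Int := if b then min 3 (c + 1) else max 0 (c - 1)

-- mispredictions of one counter replayed over one outcome sequence
def pvSim : Int → List Bool → Int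
  | _, [] => 0
  | c, b :: s => pvMis c b + pvSim (pvNxt c b) s

-- the outcome sequence that index j sees
def pvSeq (size j : Int) (lines : List String) : List Bool :=
  (lines.filter (fun l => decide (pvIdx size l = j))).map pvTaken

lemma pvSeq_cons (size j : Int) (line : String) (rest : List String) :
    pvSeq size j (line :: rest)
      = if pvIdx size line = j then pvTaken line :: pvSeq size j rest else pvSeq size j rest := by
  simp only [pvSeq, List.filter_cons]
  by_cases h : pvIdx size line = j <;> simp [h]

lemma slice_take2 (xs : List String) :
    PySem.List.slice xs none (some 2) = xs.take 2 := by
  simp only [PySem.List.slice, Nat.ofNat_nonneg, PySem.List.clampIdx_of_nonneg, Int.reduceToNat,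
    tsub_zero, List.drop_zero, List.take_eq_take_iff, inf_le_right, inf_of_le_left]

lemma getD_pySetD (xs : List Int) (i j v : Int) (hi : 0 ≤ i)
    (hj : 0 ≤ j) (hjl : j < xs.length) :
    PySem.List.pyGetD (PySem.List.pySetD xs i v) j 0 = if j = i then v else PySem.List.pyGetD xs j 0 := by
  rw [PySem.List.pySetD_of_nonneg xs v hi]
  rw [PySem.List.pyGetD_eq_getElem (xs.set i.toNat v) 0 hj (by simpa using hjl),
      PySem.List.pyGetD_eq_getElem xs 0 hj hjl]
  rw [List.getElem_set]
  by_cases h : j = i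
  · simp [h]
  · have : i.toNat ≠ j.toNat := by omega
    simp [this, h]

lemma length_pySetD (xs : List Int) (i v : Int) (hi : 0 ≤ i) :
    (PySem.List.pySetD xs i v).length = xs.length := by
  rw [PySem.List.pySetD_of_nonneg xs v hi]; simp

-- one A-step, characterised through pvMis / pvNxt (valid while the entry is a 2-bit state)
lemma stepA_char (size inc : Int) (t : List Int) (line : String) (hs : 0 < size)
    (hlen : t.length = size.toNat)
    (h0 : 0 ≤ PySem.List.pyGetD t (pvIdx size line) 0)
    (h3 : PySem.List.pyGetD t (pvIdx size line) 0 ≤ 3) :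
    (pvStepA size (inc, t) line).1
        = inc + pvMis (PySem.List.pyGetD t (pvIdx size line) 0) (pvTaken line) ∧
    (pvStepA size (inc, t) line).2.length = t.length ∧
    ∀ j : Int, 0 ≤ j → j < size →
      PySem.List.pyGetD (pvStepA size (inc, t) line).2 j 0
        = if j = pvIdx size line
          then pvNxt (PySem.List.pyGetD t (pvIdx size line) 0) (pvTaken line)
          else PySem.List.pyGetD t j 0 := by
  have hi0 : 0 ≤ pvIdx size line := PySem.Int.mod_nonneg _ hs
  have hi1 : pvIdx size line < size := PySem.Int.mod_lt _ hs
  simp only [pvStepA]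
  rw [show PySem.Int.mod ((PySem.Int.ofStrBase? (PySem.List.pyGetD (PySem.Str.split₀ line) 0 "") 16).getD 0) size = pvIdx size line from rfl]
  set i := pvIdx size line with hi
  set c := PySem.List.pyGetD t i 0 with hc
  have hset : ∀ v j : Int, 0 ≤ j → j < size →
      PySem.List.pyGetD (PySem.List.pySetD t i v) j 0 = if j = i then v else PySem.List.pyGetD t j 0 :=
    fun v j hj0 hj1 => getD_pySetD t i j v hi0 hj0 (by omega)
  have hlset : ∀ v : Int, (PySem.List.pySetD t i v).length = t.length :=
    fun v => length_pySetD t i v hi0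
  have hcase : c = 0 ∨ c = 1 ∨ c = 2 ∨ c = 3 := by omega
  by_cases ha : (PySem.Int.ofStr? (PySem.List.pyGetD (PySem.Str.split₀ line) 1 "")).getD 0 = 1
  · have hb : pvTaken line = true := by simp [pvTaken, ha]
    rw [hb]
    rcases hcase with hc0 | hc0 | hc0 | hc0 <;> rw [hc0] <;> simp only [ha] <;> norm_num
    · refine ⟨by decide, fun j hj0 hj1 => ?_⟩
      rw [hset _ j hj0 hj1]; split <;> simp [pvNxt]
    · refine ⟨by decide, fun j hj0 hj1 => ?_⟩
      rw [hset _ j hj0 hj1]; split <;> simp [pvNxt]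
    · refine ⟨by decide, fun j hj0 hj1 => ?_⟩
      rw [hset _ j hj0 hj1]; split <;> simp [pvNxt]
    · refine ⟨by decide, fun j hj0 hj1 hji => ?_⟩
      subst hji; rw [← hc, hc0]; simp [pvNxt]
  · have hb : pvTaken line = false := by simp [pvTaken, ha]
    rw [hb]
    rcases hcase with hc0 | hc0 | hc0 | hc0 <;> rw [hc0] <;> simp only [ha] <;> norm_num
    · refine ⟨by decide, fun j hj0 hj1 hji => ?_⟩
      subst hji; rw [← hc, hc0]; simp [pvNxt]
    · refine ⟨by decide, fun j hj0 hj1 => ?_⟩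
      rw [hset _ j hj0 hj1]; split <;> simp [pvNxt]
    · refine ⟨by decide, fun j hj0 hj1 => ?_⟩
      rw [hset _ j hj0 hj1]; split <;> simp [pvNxt]
    · refine ⟨by decide, fun j hj0 hj1 => ?_⟩
      rw [hset _ j hj0 hj1]; split <;> simp [pvNxt]

-- running total of A's fold equals the per-index sum of independent simulations
lemma foldA_sum (size : Int) (hs : 0 < size) (lines : List String) :
    ∀ (inc : Int) (t : List Int), t.length = size.toNat →
    (∀ j : Int, 0 ≤ j → j < size →
        0 ≤ PySem.List.pyGetD t j 0 ∧ PySem.List.pyGetD t j 0 ≤ 3) →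
    (lines.foldl (pvStepA size) (inc, t)).1
      = inc + ∑ j ∈ Finset.range size.toNat,
          pvSim (PySem.List.pyGetD t (j : Int) 0) (pvSeq size (j : Int) lines) := by
  induction lines with
  | nil => intro inc t _ _; simp [pvSeq, pvSim]
  | cons line rest ih =>
    intro inc t hlen hrange
    have hi0 : 0 ≤ pvIdx size line := PySem.Int.mod_nonneg _ hs
    have hi1 : pvIdx size line < size := PySem.Int.mod_lt _ hs
    obtain ⟨h1, h2, h3⟩ := stepA_char size inc t line hs hlen
      (hrange _ hi0 hi1).1 (hrange _ hi0 hi1).2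
    rw [List.foldl_cons]
    have hrange' : ∀ j : Int, 0 ≤ j → j < size →
        0 ≤ PySem.List.pyGetD (pvStepA size (inc, t) line).2 j 0 ∧
        PySem.List.pyGetD (pvStepA size (inc, t) line).2 j 0 ≤ 3 := by
      intro j hj0 hj1
      rw [h3 j hj0 hj1]
      split
      · have hcb := hrange _ hi0 hi1
        unfold pvNxt; split <;> omega
      · exact hrange j hj0 hj1
    have hfold := ih (pvStepA size (inc, t) line).1 (pvStepA size (inc, t) line).2
      (by rw [h2, hlen]) hrange'
    rw [Prod.mk.eta] at hfold
    rw [hfold, h1]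
    have hsum : ∑ j ∈ Finset.range size.toNat,
          pvSim (PySem.List.pyGetD t (j : Int) 0) (pvSeq size (j : Int) (line :: rest))
        = pvMis (PySem.List.pyGetD t (pvIdx size line) 0) (pvTaken line)
          + ∑ j ∈ Finset.range size.toNat,
              pvSim (PySem.List.pyGetD (pvStepA size (inc, t) line).2 (j : Int) 0)
                (pvSeq size (j : Int) rest) := by
      have step : ∀ j ∈ Finset.range size.toNat,
          pvSim (PySem.List.pyGetD t (j : Int) 0) (pvSeq size (j : Int) (line :: rest))
            = (if j = (pvIdx size line).toNat
                then pvMis (PySem.List.pyGetD t (pvIdx size line) 0) (pvTaken line) else 0)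
              + pvSim (PySem.List.pyGetD (pvStepA size (inc, t) line).2 (j : Int) 0)
                  (pvSeq size (j : Int) rest) := by
        intro j hj
        have hj1 : ((j : Int)) < size := by have := Finset.mem_range.mp hj; omega
        have hj0 : (0 : Int) ≤ (j : Int) := by omega
        rw [h3 _ hj0 hj1, pvSeq_cons]
        by_cases hji : (j : Int) = pvIdx size line
        · have hji' : j = (pvIdx size line).toNat := by omega
          rw [if_pos hji.symm, if_pos hji, if_pos hji', hji, pvSim]
        · have hji' : ¬ j = (pvIdx size line).toNat := by omega
          rw [if_neg (fun h => hji h.symm), if_neg hji, if_neg hji', zero_add]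
      rw [Finset.sum_congr rfl step, Finset.sum_add_distrib,
        Finset.sum_ite_eq' (Finset.range size.toNat)]
      rw [if_pos (Finset.mem_range.mpr (by omega))]
    rw [hsum]
    ring

-- stage 1 of B builds exactly the per-index outcome sequences
lemma buckets_getD (size : Int) (lines : List String) :
    ∀ (d : PySem.Dict Int (List Bool)) (j : Int),
      (lines.foldl (pvBucketB size) d).getD j [] = d.getD j [] ++ pvSeq size j lines := by
  induction lines with
  | nil => intro d j; simp [pvSeq]
  | cons line rest ih =>
    intro d j
    have hb : pvBucketB size d line
        = d.insert (pvIdx size line) (d.getD (pvIdx size line) [] ++ [pvTaken line]) := by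
      simp [pvBucketB, pvIdx, pvTaken, slice_take2, PySem.List.pyGetD_ofNat']
    rw [List.foldl_cons, hb, ih, PySem.Dict.getD_insert, pvSeq_cons]
    by_cases h : pvIdx size line = j
    · rw [if_pos h, if_pos h.symm, h, List.append_assoc, List.singleton_append]
    · rw [if_neg h, if_neg (fun hh => h hh.symm)]

-- stage 2 inner loop of B is pvSim
lemma foldB_inner (s : List Bool) : ∀ (total c : Int),
    (s.foldl
      (fun st taken =>
        (if decide (2 ≤ st.2) ≠ taken then st.1 + 1 else st.1,
         if taken then min 3 (st.2 + 1) else max 0 (st.2 - 1)))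
      (total, c)).1 = total + pvSim c s := by
  induction s with
  | nil => intro total c; simp [pvSim]
  | cons b s ih =>
    intro total c
    simp only [List.foldl_cons, pvSim, pvMis, pvNxt, ih]
    by_cases h : decide (2 ≤ c) ≠ b
    · simp [h]; omega
    · simp [h]

lemma sum_map_range (f : ℕ → Int) (n : ℕ) :
    ((List.range n).map f).sum = ∑ j ∈ Finset.range n, f j := by
  induction n with
  | zero => simp
  | succ n ih => simp [List.range_succ, Finset.sum_range_succ, ih]

lemma foldl_ext' {α β : Type} (f g : α → β → α) (l : List β) (i : α)
    (h : ∀ a b, f a b = g a b) : l.foldl f i = l.foldl g i := by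
  induction l generalizing i with
  | nil => rfl
  | cons x xs ih => simp [List.foldl_cons, h, ih]

-- B computes the per-index sum of independent simulations
lemma B_eq_sum (lines : List String) (size : Int) :
    two_bit_prediction_alt lines size
      = ∑ j ∈ Finset.range size.toNat, pvSim 0 (pvSeq size (j : Int) lines) := by
  unfold two_bit_prediction_alt
  have hfun : ∀ (total j : Int),
      ((((lines.foldl (pvBucketB size) PySem.Dict.empty).getD j []).foldl
          (fun st taken =>
            (if decide (2 ≤ st.2) ≠ taken then st.1 + 1 else st.1,
             if taken then min 3 (st.2 + 1) else max 0 (st.2 - 1)))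
          (total, (0 : Int))).1)
        = total + pvSim 0 (pvSeq size j lines) := by
    intro total j
    rw [buckets_getD size lines PySem.Dict.empty j, PySem.Dict.getD_empty,
      List.nil_append]
    exact foldB_inner _ total 0
  rw [foldl_ext' _ _ _ _ hfun, PySem.List.foldl_add, PySem.List.pyRange_one,
    List.map_map, zero_add, sum_map_range]
  refine Finset.sum_congr (by simp) (fun j hj => ?_)
  simp [Function.comp]

lemma pvFoldl_append_zero (l : List Int) (init : List Int) :
    l.foldl (fun t _ => t ++ [(0 : Int)]) init = init ++ List.replicate l.length 0 := by
  induction l generalizing init with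
  | nil => simp
  | cons x xs ih => simp [ih, List.replicate_succ]

lemma replicate_getD (n : ℕ) (j : Int) (hj : 0 ≤ j) (hjn : j < (n : Int)) :
    PySem.List.pyGetD (List.replicate n (0 : Int)) j 0 = 0 := by
  rw [PySem.List.pyGetD_eq_getElem _ _ hj (by simp; omega)]
  exact List.getElem_replicate ..

-- ===== VERDICT (by name: the statement is the Claim_ definition above) =====
theorem two_bit_prediction_spec : Claim_equal_two_bit_prediction := by
  intro lines size _ hpre
  unfold Spec_two_bit_prediction
  rcases hpre with h | ⟨hs, _⟩
  · subst h
    rw [B_eq_sum]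
    simp [two_bit_prediction, pvSeq, pvSim]
  · unfold two_bit_prediction
    have htab : (PySem.List.pyRange 0 size 1).foldl (fun t _ => t ++ [(0 : Int)]) [] =
        List.replicate size.toNat (0 : Int) := by
      rw [pvFoldl_append_zero]
      simp [PySem.List.length_pyRange_one]
    rw [htab, B_eq_sum,
      foldA_sum size hs lines 0 (List.replicate size.toNat 0) (by simp)
        (fun j hj0 hj1 => by rw [replicate_getD _ _ hj0 (by omega)]; omega)]
    rw [zero_add]
    refine Finset.sum_congr rfl (fun j hj => ?_)
    rw [replicate_getD _ _ (by omega) (by have := Finset.mem_range.mp hj; omega)]
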